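-- pv_equiv track=rewrite | github.com/Diegoval-Dev/R-Lab2 | receiver-py/src/link.py | apply_hamming
-- ===== SOURCE A (Python) =====
-- from typing import List, Tuple
--
-- def apply_hamming(data_bits: List[int]) -> List[int]:
--     """
--     Applies Hamming(7,4) encoding to data bits.
--     Uses the Go implementation logic.
--
--     Args:
--         data_bits: Input data bits
--
--     Returns:
--         Hamming encoded bits
--     """
--     # Pad to multiple of 4 bits
--     padded_bits = data_bits.copy()
--     while len(padded_bits) % 4 != 0:
--         padded_bits.append(0)
--
--     encoded_bits = []
--
--     for i in range(0, len(padded_bits), 4):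
--         # Extract 4 data bits: [d3, d2, d1, d0]
--         d3, d2, d1, d0 = padded_bits[i:i+4]
--
--         # Calculate parity bits
--         p0 = d3 ^ d2 ^ d0
--         p1 = d3 ^ d1 ^ d0
--         p2 = d2 ^ d1 ^ d0
--
--         # Arrange as [p2, p1, d3, p0, d2, d1, d0]
--         block = [p2, p1, d3, p0, d2, d1, d0]
--         encoded_bits.extend(block)
--
--     return encoded_bits
-- ===== SOURCE B (Python) =====
-- # Columnar (structure-of-arrays) encoder: strided slices pull out the four data-bit
-- # columns, parity columns are computed in whole-list passes, and the result is the
-- # 7-way interleave of the columns -- no per-block loop; zero-padding in closed form.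
-- def apply_hamming(data_bits):
--     bits = data_bits + [0] * (-len(data_bits) % 4)
--     d3s, d2s, d1s, d0s = bits[0::4], bits[1::4], bits[2::4], bits[3::4]
--     p0s = [x ^ y ^ z for x, y, z in zip(d3s, d2s, d0s)]
--     p1s = [x ^ y ^ z for x, y, z in zip(d3s, d1s, d0s)]
--     p2s = [x ^ y ^ z for x, y, z in zip(d2s, d1s, d0s)]
--     return [b for row in zip(p2s, p1s, d3s, p0s, d2s, d1s, d0s) for b in row]
-- ===== Notes on version B (the rewrite author's own statement) =====
-- stated objective: alternative
-- what changed: A's single pass over 4-bit blocks with inline parity formulas is replaced by a columnar (structure-of-arrays) pipeline: closed-form zero-padding, four strided slices extracting the data-bit columns, three whole-column zip passes computing the parity columns, and a 7-way interleave producing the output - there is no per-block loop at all.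
import Mathlib
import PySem

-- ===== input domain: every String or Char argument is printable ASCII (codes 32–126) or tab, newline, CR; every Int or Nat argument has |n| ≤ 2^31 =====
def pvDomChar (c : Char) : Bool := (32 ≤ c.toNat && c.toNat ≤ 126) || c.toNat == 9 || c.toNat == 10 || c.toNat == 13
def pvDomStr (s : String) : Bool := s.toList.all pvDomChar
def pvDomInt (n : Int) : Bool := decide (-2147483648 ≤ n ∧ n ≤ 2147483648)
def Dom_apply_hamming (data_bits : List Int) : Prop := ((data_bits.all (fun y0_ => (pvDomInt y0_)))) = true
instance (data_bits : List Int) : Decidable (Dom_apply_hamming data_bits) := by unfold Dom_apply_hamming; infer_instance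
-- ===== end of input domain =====

-- B replaces A's per-block loop with a columnar (structure-of-arrays) pipeline:
-- strided slices extract the data-bit columns, parities are whole-column passes,
-- and the output is a 7-way interleave (objective: alternative, same cost).

-- ===== PORT A =====
-- 'padded_bits = data_bits.copy(); while len(padded_bits) % 4 != 0: padded_bits.append(0)'
def pvPadA (l : List Int) : List Int :=
  if l.length % 4 ≠ 0 then pvPadA (l ++ [0]) else l
termination_by (4 - l.length % 4) % 4
decreasing_by simp; omega

-- loop body: 'd3, d2, d1, d0 = padded_bits[i:i+4]; …; encoded_bits.extend(block)'
-- (the '_ => acc' arm is unreachable: inside the loop the slice always has 4 elements)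
def pvBlockA (acc : List Int) (chunk : List Int) : List Int :=
  match chunk with
  | [d3, d2, d1, d0] =>
    let p0 := PySem.Int.bxor (PySem.Int.bxor d3 d2) d0
    let p1 := PySem.Int.bxor (PySem.Int.bxor d3 d1) d0
    let p2 := PySem.Int.bxor (PySem.Int.bxor d2 d1) d0
    acc ++ [p2, p1, d3, p0, d2, d1, d0]
  | _ => acc

def apply_hamming (data_bits : List Int) : List Int :=
  let padded := pvPadA data_bits
  (PySem.List.pyRange 0 (padded.length : Int) 4).foldl
    (fun acc i => pvBlockA acc (PySem.List.slice padded (some i) (some (i + 4)))) []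

-- ===== PORT B =====
-- '[x ^ y ^ z for x, y, z in zip(a, b, c)]'
def pvXor3 (x y z : Int) : Int := PySem.Int.bxor (PySem.Int.bxor x y) z

-- '[b for row in zip(l1, …, l7) for b in row]' (zip stops at the shortest list)
def pvInterleave7 : List Int → List Int → List Int → List Int → List Int → List Int → List Int → List Int
  | a :: as, b :: bs, c :: cs, d :: ds, e :: es, f :: fs, g :: gs =>
      a :: b :: c :: d :: e :: f :: g :: pvInterleave7 as bs cs ds es fs gs
  | _, _, _, _, _, _, _ => []

def apply_hamming_alt (data_bits : List Int) : List Int :=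
  let bits := data_bits ++ List.replicate (PySem.Int.mod (-(data_bits.length : Int)) 4).toNat 0
  let d3s := (PySem.List.slice? bits (some 0) none 4).getD []
  let d2s := (PySem.List.slice? bits (some 1) none 4).getD []
  let d1s := (PySem.List.slice? bits (some 2) none 4).getD []
  let d0s := (PySem.List.slice? bits (some 3) none 4).getD []
  let p0s := List.zipWith3 pvXor3 d3s d2s d0s
  let p1s := List.zipWith3 pvXor3 d3s d1s d0s
  let p2s := List.zipWith3 pvXor3 d2s d1s d0s
  pvInterleave7 p2s p1s d3s p0s d2s d1s d0s

-- ===== PRECONDITION & SPEC =====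
def Spec_apply_hamming (data_bits : List Int) (out : List Int) : Prop := out = apply_hamming_alt data_bits
instance (data_bits : List Int) (out : List Int) : Decidable (Spec_apply_hamming data_bits out) := by unfold Spec_apply_hamming; infer_instance

-- ===== CLAIM (what is proved, stated in full; the proofs are below) =====
def Claim_equal_apply_hamming : Prop := ∀ (data_bits : List Int), Dom_apply_hamming data_bits → Spec_apply_hamming data_bits (apply_hamming data_bits)

-- ===== LEMMAS AND PROOFS =====

-- every 4th element, starting at the head (characterisation of xs[k::4] as pvS4 (xs.drop k))
def pvS4 : List Int → List Int
  | [] => []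
  | x :: r => x :: pvS4 (r.drop 3)
termination_by l => l.length
decreasing_by simp

theorem pvS4_nil : pvS4 [] = [] := by rw [pvS4]

theorem pvS4_cons (x : Int) (r : List Int) : pvS4 (x :: r) = x :: pvS4 (r.drop 3) := by rw [pvS4]

theorem pvI7_nil : pvInterleave7 [] [] [] [] [] [] [] = [] := by
  rw [pvInterleave7]
  simp

theorem pvI7_cons (a b c d e f g : Int) (as bs cs ds es fs gs : List Int) :
    pvInterleave7 (a :: as) (b :: bs) (c :: cs) (d :: ds) (e :: es) (f :: fs) (g :: gs)
      = a :: b :: c :: d :: e :: f :: g :: pvInterleave7 as bs cs ds es fs gs := by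
  rw [pvInterleave7]

-- what A appends, block after block
def pvEncodeBlocks : List Int → List Int
  | d3 :: d2 :: d1 :: d0 :: rest =>
      [pvXor3 d2 d1 d0, pvXor3 d3 d1 d0, d3, pvXor3 d3 d2 d0, d2, d1, d0] ++ pvEncodeBlocks rest
  | _ => []

theorem pvPadA_eq (l : List Int) :
    pvPadA l = l ++ List.replicate ((4 - l.length % 4) % 4) 0 := by
  fun_induction pvPadA l with
  | case1 l h ih =>
    have hc : (4 - l.length % 4) % 4 = ((4 - (l ++ [0]).length % 4) % 4) + 1 := by
      simp only [List.length_append, List.length_cons, List.length_nil]; omega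
    rw [ih, hc, List.append_assoc]
    congr 1
  | case2 l h =>
    have hc : (4 - l.length % 4) % 4 = 0 := by omega
    simp [hc]

theorem pvAltPad_eq (l : List Int) :
    l ++ List.replicate (PySem.Int.mod (-(l.length : Int)) 4).toNat 0 = pvPadA l := by
  rw [pvPadA_eq]
  congr 2
  show (Int.fmod (-(l.length : Int)) 4).toNat = (4 - l.length % 4) % 4
  rw [Int.fmod_eq_emod]
  simp; omega

theorem pvFourCons (bs : List Int) (h : 4 ≤ bs.length) :
    ∃ a b c d r, bs = a :: b :: c :: d :: r := by
  match bs with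
  | a :: b :: c :: d :: r => exact ⟨a, b, c, d, r, rfl⟩
  | [] => simp at h
  | [_] => simp at h
  | [_, _] => simp at h
  | [_, _, _] => simp at h

theorem pvLoopA (padded : List Int) (c : Nat) :
    ∀ (j : Nat) (acc : List Int), padded.length = j + 4 * c →
    (List.range c).foldl
      (fun (acc : List Int) (k : Nat) => pvBlockA acc
        (PySem.List.slice padded (some ((j : Int) + 4 * ((k : Nat) : Int))) (some ((j : Int) + 4 * ((k : Nat) : Int) + 4)))) acc
      = acc ++ pvEncodeBlocks (padded.drop j) := by
  induction c with
  | zero =>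
    intro j acc hlen
    have : padded.drop j = [] := by
      apply List.drop_eq_nil_of_le; omega
    simp [this, pvEncodeBlocks]
  | succ c ih =>
    intro j acc hlen
    have h4 : 4 ≤ (padded.drop j).length := by simp; omega
    obtain ⟨d3, d2, d1, d0, r, hsh⟩ := pvFourCons _ h4
    have hr : padded.drop (j + 4) = r := by
      rw [← List.drop_drop, hsh]; simp
    have hslice : PySem.List.slice padded (some ((j : Int) + 4 * ((0 : Nat) : Int)))
        (some ((j : Int) + 4 * ((0 : Nat) : Int) + 4)) = [d3, d2, d1, d0] := by
      rw [show ((j : Int) + 4 * ((0 : Nat) : Int) + 4) = (((j : Nat) : Int) + ((4 : Nat) : Int)) from by push_cast; ring,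
          show ((j : Int) + 4 * ((0 : Nat) : Int)) = ((j : Nat) : Int) from by push_cast; ring,
          PySem.List.slice_natCast_add, hsh]
      simp
    rw [List.range_succ_eq_map, List.foldl_cons, List.foldl_map, hslice]
    have hfun : (fun (acc : List Int) (k : Nat) => pvBlockA acc
          (PySem.List.slice padded (some ((j : Int) + 4 * ((k + 1 : Nat) : Int))) (some ((j : Int) + 4 * ((k + 1 : Nat) : Int) + 4))))
        = (fun (acc : List Int) (k : Nat) => pvBlockA acc
          (PySem.List.slice padded (some (((j + 4 : Nat) : Int) + 4 * (k : Int))) (some (((j + 4 : Nat) : Int) + 4 * (k : Int) + 4)))) := by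
      funext acc k
      congr 2 <;> push_cast <;> ring_nf
    rw [hfun, ih (j + 4) _ (by omega), hr, hsh]
    simp [pvEncodeBlocks, pvBlockA, pvXor3]

-- A's whole program computes pvEncodeBlocks of the padded list
theorem pvA_eq (data_bits : List Int) :
    apply_hamming data_bits = pvEncodeBlocks (pvPadA data_bits) := by
  rw [apply_hamming]
  set padded := pvPadA data_bits with hp
  have hmod : padded.length % 4 = 0 := by
    rw [hp, pvPadA_eq]; simp; omega
  obtain ⟨c, hc⟩ : ∃ c, padded.length = 4 * c := ⟨padded.length / 4, by omega⟩
  rw [PySem.List.pyRange_of_pos 0 (padded.length : Int) (by norm_num)]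
  have hcount : (if (0 : Int) < (padded.length : Int) then
      (((padded.length : Int) - 0 + 4 - 1) / 4).toNat else 0) = c := by
    split
    · rw [hc]; push_cast; omega
    · omega
  rw [hcount, List.foldl_map]
  have hfun : (fun (acc : List Int) (k : Nat) => pvBlockA acc
        (PySem.List.slice padded (some ((0 : Int) + 4 * (k : Int))) (some ((0 : Int) + 4 * (k : Int) + 4))))
      = (fun (acc : List Int) (k : Nat) => pvBlockA acc
        (PySem.List.slice padded (some ((((0 : Nat)) : Int) + 4 * (k : Int))) (some ((((0 : Nat)) : Int) + 4 * (k : Int) + 4)))) := by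
    funext acc k; norm_num
  rw [hfun, pvLoopA padded c 0 [] (by omega)]
  simp

-- range/filterMap core of slice? with step 4 equals pvS4 of the dropped list
theorem pvF_eq (xs : List Int) :
    ∀ (k : Nat), (List.range ((xs.length - k + 3) / 4)).filterMap (fun j => xs[k + 4 * j]?)
      = pvS4 (xs.drop k) := by
  have H : ∀ m, ∀ k : Nat, xs.length - k = m →
      (List.range ((xs.length - k + 3) / 4)).filterMap (fun j => xs[k + 4 * j]?)
        = pvS4 (xs.drop k) := by
    intro m
    induction m using Nat.strong_induction_on with
    | _ m ih =>
      intro k hk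
      by_cases hkl : xs.length ≤ k
      · have h0 : (xs.length - k + 3) / 4 = 0 := by omega
        have hd : xs.drop k = [] := List.drop_eq_nil_of_le hkl
        simp [h0, hd, pvS4_nil]
      · have hlt : k < xs.length := by omega
        have hc : (xs.length - k + 3) / 4 = ((xs.length - (k + 4) + 3) / 4) + 1 := by omega
        rw [hc, List.range_succ_eq_map, List.filterMap_cons, List.filterMap_map]
        have hget : xs[k + 4 * 0]? = some xs[k] := by
          have he : k + 4 * 0 = k := by omega
          rw [he, List.getElem?_eq_getElem (by omega)]
        have hdk : xs.drop k = xs[k] :: xs.drop (k + 1) := by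
          rw [List.getElem_cons_drop]
        have hcomp : ((fun j => xs[k + 4 * j]?) ∘ Nat.succ) = (fun j => xs[(k + 4) + 4 * j]?) := by
          funext j; simp [Function.comp]; congr 1; omega
        rw [hget, hcomp, ih _ (by omega) (k + 4) rfl]
        have hdd : (xs.drop (k + 1)).drop 3 = xs.drop (k + 4) := by
          rw [List.drop_drop]
        rw [hdk, pvS4_cons, hdd]
  intro k; exact H _ k rfl

-- xs[k::4] (k ≥ 0) is every 4th element of xs.drop k
theorem pvSlice4 (xs : List Int) (k : Int) (hk : 0 ≤ k) :
    PySem.List.slice? xs (some k) none 4 = some (pvS4 (xs.drop k.toNat)) := by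
  simp only [PySem.List.slice?, PySem.List.sliceIndices]
  norm_num
  have hnot : ¬ k < 0 := by omega
  simp only [if_neg hnot]
  by_cases hkl : k < (xs.length : Int)
  · have hmin : min k (xs.length : Int) = k := by omega
    rw [hmin, if_pos hkl]
    have hif : ((((xs.length : Int) - k) + 4 - 1) / 4).toNat = (xs.length - k.toNat + 3) / 4 := by
      omega
    rw [hif]
    have hfun : (fun x : Nat => xs[(k + 4 * (x : Int)).toNat]?) = fun x : Nat => xs[k.toNat + 4 * x]? := by
      funext x; congr 1; omega
    rw [hfun, pvF_eq]
  · have hmin : min k (xs.length : Int) = (xs.length : Int) := by omega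
    rw [hmin]
    simp only [lt_irrefl, if_false]
    have hd : xs.drop k.toNat = [] := List.drop_eq_nil_of_le (by omega)
    simp [hd, pvS4_nil]

theorem pvCol_eq : ∀ bits : List Int, bits.length % 4 = 0 →
    pvInterleave7
      (List.zipWith3 pvXor3 (pvS4 (bits.drop 1)) (pvS4 (bits.drop 2)) (pvS4 (bits.drop 3)))
      (List.zipWith3 pvXor3 (pvS4 bits) (pvS4 (bits.drop 2)) (pvS4 (bits.drop 3)))
      (pvS4 bits)
      (List.zipWith3 pvXor3 (pvS4 bits) (pvS4 (bits.drop 1)) (pvS4 (bits.drop 3)))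
      (pvS4 (bits.drop 1)) (pvS4 (bits.drop 2)) (pvS4 (bits.drop 3))
      = pvEncodeBlocks bits := by
  intro bits
  fun_induction pvEncodeBlocks bits with
  | case1 d3 d2 d1 d0 rest ih =>
    intro h
    have h' : rest.length % 4 = 0 := by simp at h; omega
    simpa [pvS4_cons, List.zipWith3, pvI7_cons] using ih h'
  | case2 bits hne =>
    intro h
    match bits, hne, h with
    | [], _, _ => simp [pvS4_nil, pvI7_nil]
    | [_], _, h => simp at h
    | [_, _], _, h => simp at h
    | [_, _, _], _, h => simp at h
    | a :: b :: c :: d :: r, hne, _ => exact absurd rfl (hne a b c d r)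

theorem pvB_eq (l : List Int) : apply_hamming_alt l = pvEncodeBlocks (pvPadA l) := by
  rw [apply_hamming_alt]
  simp only [pvAltPad_eq]
  have hmod : (pvPadA l).length % 4 = 0 := by
    rw [pvPadA_eq]; simp; omega
  simp only [pvSlice4 _ 0 (by norm_num), pvSlice4 _ 1 (by norm_num),
             pvSlice4 _ 2 (by norm_num), pvSlice4 _ 3 (by norm_num), Option.getD_some]
  simpa using pvCol_eq _ hmod

-- ===== VERDICT (by name: the statement is the Claim_ definition above) =====
theorem apply_hamming_spec : Claim_equal_apply_hamming := by
  intro data_bits _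
  show apply_hamming data_bits = apply_hamming_alt data_bits
  rw [pvA_eq, pvB_eq]
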